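-- pv_equiv track=rewrite | github.com/VakaPrasanna/newjghacon | utils.py | multiline_to_commands
-- ===== SOURCE A (Python) =====
-- from typing import List, Dict, Any, Optional, Set
--
-- def multiline_to_commands(text: str) -> List[str]:
--     """Convert multiline shell script to individual commands"""
--     commands = []
--     lines = text.strip().split('\n')
--     current_command = ""
--
--     for line in lines:
--         line = line.strip()
--         if not line or line.startswith('#'):
--             continue
--
--         # Handle line continuations
--         if line.endswith('\\'):
--             current_command += line[:-1] + " "
--         else:
--             current_command += line
--             if current_command.strip():
--                 commands.append(current_command.strip())
--             current_command = ""
--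
--     if current_command.strip():
--         commands.append(current_command.strip())
--
--     return commands
-- ===== SOURCE B (Python) =====
-- def multiline_to_commands(text):
--     """Convert multiline shell script to individual commands"""
--     kept = [s for s in (l.strip() for l in text.strip().split('\n'))
--             if s and not s.startswith('#')]
--     merged = ''.join(l + '\n' for l in kept).replace('\\\n', ' ')
--     return [c for c in (p.strip() for p in merged.split('\n')) if c]
-- ===== Notes on version B (the rewrite author's own statement) =====
-- stated objective: alternative
-- what changed: A runs one stateful loop with a growing current_command string flushed on non-continuation lines; B has no accumulator loop at all: it filters the stripped lines, flattens them into one newline-terminated string, collapses every backslash-newline pair into a space with str.replace, and splits the result back into commands.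
import Mathlib
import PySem

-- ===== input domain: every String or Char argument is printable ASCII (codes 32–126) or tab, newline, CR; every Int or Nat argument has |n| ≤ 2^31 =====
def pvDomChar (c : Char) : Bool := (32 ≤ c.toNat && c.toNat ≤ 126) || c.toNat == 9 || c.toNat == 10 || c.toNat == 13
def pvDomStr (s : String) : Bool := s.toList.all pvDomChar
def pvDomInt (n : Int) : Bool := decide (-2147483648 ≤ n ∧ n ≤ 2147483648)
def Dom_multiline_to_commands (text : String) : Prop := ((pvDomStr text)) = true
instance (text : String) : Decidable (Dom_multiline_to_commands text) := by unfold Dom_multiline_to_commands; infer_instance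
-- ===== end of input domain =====

-- B replaces A's stateful accumulator loop by staged text transformations: filter the stripped
-- lines, flatten them into one newline-terminated string, collapse '\'+newline pairs into a
-- space with str.replace, and split back into commands — same cost, no loop state.

-- ===== PORT A =====
-- A's loop over the lines, carrying (commands, current_command); the final flush is the [] case
def pvALoop (lines : List (List Char)) (commands : List (List Char)) (current : List Char) :
    List (List Char) :=
  match lines with
  | [] =>
      if PySem.Chars.strip current ≠ [] then commands ++ [PySem.Chars.strip current] else commands
  | l :: rest =>
      let line := PySem.Chars.strip l
      if line.isEmpty || PySem.Chars.startswith line ['#'] then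
        pvALoop rest commands current
      else if PySem.Chars.endswith line ['\\'] then
        pvALoop rest commands (current ++ PySem.List.slice line none (some (-1)) ++ [' '])
      else
        let current' := current ++ line
        if PySem.Chars.strip current' ≠ [] then
          pvALoop rest (commands ++ [PySem.Chars.strip current']) []
        else
          pvALoop rest commands []

def multiline_to_commands (text : String) : List String :=
  (pvALoop (PySem.Chars.splitOn (PySem.Chars.strip text.toList) ['\n']) [] []).map
    (fun cs => String.ofList cs)

-- ===== PORT B =====
-- Source B's filter predicate: 's and not s.startswith("#")'
def pvKeep (s : List Char) : Bool := !s.isEmpty && !PySem.Chars.startswith s ['#']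

def multiline_to_commands_alt (text : String) : List String :=
  let kept :=
    ((PySem.Chars.splitOn (PySem.Chars.strip text.toList) ['\n']).map PySem.Chars.strip).filter
      pvKeep
  let merged :=
    PySem.Chars.replace (PySem.Chars.join [] (kept.map (fun l => l ++ ['\n']))) ['\\', '\n'] [' ']
  (((PySem.Chars.splitOn merged ['\n']).map PySem.Chars.strip).filter
      (fun c => !c.isEmpty)).map (fun cs => String.ofList cs)

-- ===== PRECONDITION & SPEC =====
def Spec_multiline_to_commands (text : String) (out : List String) : Prop := out = multiline_to_commands_alt text
instance (text : String) (out : List String) : Decidable (Spec_multiline_to_commands text out) := by unfold Spec_multiline_to_commands; infer_instance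

-- ===== CLAIM (what is proved, stated in full; the proofs are below) =====
def Claim_equal_multiline_to_commands : Prop := ∀ (text : String), Dom_multiline_to_commands text → Spec_multiline_to_commands text (multiline_to_commands text)

-- ===== LEMMAS AND PROOFS =====

-- A's loop restricted to the already-stripped, kept lines (skip branch removed)
def pvAK2 (kept : List (List Char)) (commands : List (List Char)) (current : List Char) :
    List (List Char) :=
  match kept with
  | [] =>
      if PySem.Chars.strip current ≠ [] then commands ++ [PySem.Chars.strip current] else commands
  | l :: rest =>
      if PySem.Chars.endswith l ['\\'] then
        pvAK2 rest commands (current ++ PySem.List.slice l none (some (-1)) ++ [' '])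
      else if PySem.Chars.strip (current ++ l) ≠ [] then
        pvAK2 rest (commands ++ [PySem.Chars.strip (current ++ l)]) []
      else pvAK2 rest commands []

-- spec recursion for Chars.replace s ['\\','\n'] [' ']
def pvRep : List Char → List Char
  | [] => []
  | [c] => [c]
  | c :: d :: t => if c = '\\' ∧ d = '\n' then ' ' :: pvRep t else c :: pvRep (d :: t)

-- spec recursion for Chars.splitOn s ['\n'] with the pending chunk cur (reversed)
def pvSplCur (cur : List Char) : List Char → List (List Char)
  | [] => [cur.reverse]
  | c :: t => if c = '\n' then cur.reverse :: pvSplCur [] t else pvSplCur (c :: cur) t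

-- Source B's last two stages on the merged string
def pvPost (m : List Char) : List (List Char) :=
  ((PySem.Chars.splitOn m ['\n']).map PySem.Chars.strip).filter (fun c => !c.isEmpty)

-- the flattened newline-terminated kept lines
def pvFlatN (kept : List (List Char)) : List Char := (kept.map (fun l => l ++ ['\n'])).flatten

theorem pvRepGo_nil (pat new : List Char) (fuel : Nat) (acc : List Char) :
    PySem.Chars.replace.go pat new fuel [] acc = acc.reverse := by
  cases fuel <;> simp [PySem.Chars.replace.go]

theorem pvRepGo (fuel : Nat) (l acc : List Char) (h : l.length ≤ fuel) :
    PySem.Chars.replace.go ['\\', '\n'] [' '] fuel l acc = acc.reverse ++ pvRep l := by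
  induction fuel generalizing l acc with
  | zero =>
      have : l = [] := List.length_eq_zero_iff.mp (Nat.le_zero.mp h)
      subst this; simp [pvRepGo_nil, pvRep]
  | succ n ih =>
      match l with
      | [] => simp [pvRepGo_nil, pvRep]
      | [c] =>
          have hp : (['\\', '\n'] : List Char).isPrefixOf [c] = false := by
            simp [List.isPrefixOf]
          rw [show PySem.Chars.replace.go ['\\', '\n'] [' '] (n+1) [c] acc
              = PySem.Chars.replace.go ['\\', '\n'] [' '] n [] (c :: acc) by
            simp [PySem.Chars.replace.go, hp]]
          simp [pvRepGo_nil, pvRep]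
      | c :: d :: t =>
          by_cases hcd : c = '\\' ∧ d = '\n'
          · obtain ⟨rfl, rfl⟩ := hcd
            rw [show PySem.Chars.replace.go ['\\', '\n'] [' '] (n+1) ('\\' :: '\n' :: t) acc
                = PySem.Chars.replace.go ['\\', '\n'] [' '] n t (' ' :: acc) by
              simp [PySem.Chars.replace.go, List.isPrefixOf]]
            rw [ih t (' ' :: acc) (by simp at h ⊢; omega)]
            simp [pvRep]
          · have hp : (['\\', '\n'] : List Char).isPrefixOf (c :: d :: t) = false := by
              simp [List.isPrefixOf]; intro h1 h2; exact hcd ⟨h1.symm, h2.symm⟩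
            rw [show PySem.Chars.replace.go ['\\', '\n'] [' '] (n+1) (c :: d :: t) acc
                = PySem.Chars.replace.go ['\\', '\n'] [' '] n (d :: t) (c :: acc) by
              simp [PySem.Chars.replace.go, hp]]
            rw [ih (d :: t) (c :: acc) (by simp at h ⊢; omega)]
            simp [pvRep, hcd]

theorem pvReplace_eq (l : List Char) :
    PySem.Chars.replace l ['\\', '\n'] [' '] = pvRep l := by
  rw [show PySem.Chars.replace l ['\\', '\n'] [' ']
      = PySem.Chars.replace.go ['\\', '\n'] [' '] l.length l [] by
    simp [PySem.Chars.replace]]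
  simpa using pvRepGo l.length l [] le_rfl

theorem pvSplGo (fuel : Nat) (l cur : List Char) (acc : List (List Char)) (h : l.length ≤ fuel) :
    PySem.Chars.splitOn.go ['\n'] fuel l cur acc = acc.reverse ++ pvSplCur cur l := by
  induction fuel generalizing l cur acc with
  | zero =>
      have : l = [] := List.length_eq_zero_iff.mp (Nat.le_zero.mp h)
      subst this; simp [PySem.Chars.splitOn.go, pvSplCur]
  | succ n ih =>
      match l with
      | [] => simp [PySem.Chars.splitOn.go, pvSplCur]
      | c :: t =>
          by_cases hc : c = '\n'
          · subst hc
            rw [show PySem.Chars.splitOn.go ['\n'] (n+1) ('\n' :: t) cur acc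
                = PySem.Chars.splitOn.go ['\n'] n t [] (cur.reverse :: acc) by
              simp [PySem.Chars.splitOn.go, List.isPrefixOf]]
            rw [ih t [] (cur.reverse :: acc) (by simp at h ⊢; omega)]
            simp [pvSplCur]
          · rw [show PySem.Chars.splitOn.go ['\n'] (n+1) (c :: t) cur acc
                = PySem.Chars.splitOn.go ['\n'] n t (c :: cur) acc by
              simp [PySem.Chars.splitOn.go, List.isPrefixOf, Ne.symm hc]]
            rw [ih t (c :: cur) acc (by simp at h ⊢; omega)]
            simp [pvSplCur, hc]

theorem pvSplitOn_eq (l : List Char) :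
    PySem.Chars.splitOn l ['\n'] = pvSplCur [] l := by
  rw [show PySem.Chars.splitOn l ['\n']
      = PySem.Chars.splitOn.go ['\n'] (l.length + 1) l [] [] by rfl]
  simpa using pvSplGo (l.length + 1) l [] [] (by omega)

theorem pvRep_two (c d : Char) (t : List Char) :
    pvRep (c :: d :: t) = if c = '\\' ∧ d = '\n' then ' ' :: pvRep t else c :: pvRep (d :: t) := rfl

theorem pvRep_cons_ne (c : Char) (x : List Char) (h : c ≠ '\\') :
    pvRep (c :: x) = c :: pvRep x := by
  match x with
  | [] => rfl
  | d :: s => rw [pvRep_two, if_neg (fun hcd => h hcd.1)]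

theorem pvRep_no_nl (x : List Char) (h : '\n' ∉ x) : pvRep x = x := by
  match x with
  | [] => rfl
  | [c] => rfl
  | c :: d :: t =>
      have hd : d ≠ '\n' := fun hd => h (by simp [hd])
      rw [pvRep_two, if_neg (fun hcd => hd hcd.2)]
      rw [pvRep_no_nl (d :: t) (fun hm => h (List.mem_cons_of_mem _ hm))]

theorem pvRep_step (p rest : List Char) (h : '\n' ∉ p) :
    pvRep (p ++ '\n' :: rest) =
      if p.getLast? = some '\\' then p.dropLast ++ ' ' :: pvRep rest
      else p ++ '\n' :: pvRep rest := by
  match p with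
  | [] =>
      rw [List.nil_append, pvRep_cons_ne '\n' rest (by decide)]
      simp
  | [c] =>
      by_cases hc : c = '\\'
      · subst hc
        rw [show (['\\'] ++ '\n' :: rest) = '\\' :: '\n' :: rest by simp, pvRep_two,
          if_pos ⟨rfl, rfl⟩]
        simp
      · rw [show ([c] ++ '\n' :: rest) = c :: '\n' :: rest by simp, pvRep_two,
          if_neg (fun hcd => hc hcd.1), pvRep_cons_ne '\n' rest (by decide)]
        simp [hc]
  | c :: d :: t =>
      have hd : d ≠ '\n' := fun hd => h (by simp [hd])
      have h' : '\n' ∉ d :: t := fun hm => h (List.mem_cons_of_mem _ hm)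
      have hstep := pvRep_step (d :: t) rest h'
      rw [show ((c :: d :: t) ++ '\n' :: rest) = c :: ((d :: t) ++ '\n' :: rest) by simp]
      rw [show ((d :: t) ++ '\n' :: rest) = d :: (t ++ '\n' :: rest) by simp] at hstep ⊢
      rw [pvRep_two, if_neg (fun hcd => hd hcd.2), hstep]
      by_cases hl : (d :: t).getLast? = some '\\'
      · rw [if_pos hl, if_pos (by simpa using hl)]
        simp
      · rw [if_neg hl, if_neg (by simpa using hl)]
        simp

theorem pvRep_prefix (q x : List Char) (h : '\n' ∉ q) (hl : q.getLast? ≠ some '\\') :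
    pvRep (q ++ x) = q ++ pvRep x := by
  match q with
  | [] => simp
  | [c] =>
      have hc : c ≠ '\\' := fun hc => hl (by simp [hc])
      rw [show ([c] ++ x) = c :: x by simp, pvRep_cons_ne c x hc]
      simp
  | c :: d :: t =>
      have hd : d ≠ '\n' := fun hd => h (by simp [hd])
      have h' : '\n' ∉ d :: t := fun hm => h (List.mem_cons_of_mem _ hm)
      rw [show ((c :: d :: t) ++ x) = c :: (d :: (t ++ x)) by simp, pvRep_two,
        if_neg (fun hcd => hd hcd.2),
        show (d :: (t ++ x)) = (d :: t) ++ x by simp,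
        pvRep_prefix (d :: t) x h' (by simpa using hl)]
      simp

theorem pvSpl_no_nl (x : List Char) (cur : List Char) (h : '\n' ∉ x) :
    pvSplCur cur x = [cur.reverse ++ x] := by
  match x with
  | [] => simp [pvSplCur]
  | c :: t =>
      have hc : c ≠ '\n' := fun hc => h (by simp [hc])
      rw [pvSplCur, if_neg hc, pvSpl_no_nl t (c :: cur) (fun hm => h (List.mem_cons_of_mem _ hm))]
      simp

theorem pvSpl_cons (x y : List Char) (cur : List Char) (h : '\n' ∉ x) :
    pvSplCur cur (x ++ '\n' :: y) = (cur.reverse ++ x) :: pvSplCur [] y := by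
  match x with
  | [] => simp [pvSplCur]
  | c :: t =>
      have hc : c ≠ '\n' := fun hc => h (by simp [hc])
      rw [show ((c :: t) ++ '\n' :: y) = c :: (t ++ '\n' :: y) by simp, pvSplCur, if_neg hc,
        pvSpl_cons t y (c :: cur) (fun hm => h (List.mem_cons_of_mem _ hm))]
      simp

theorem pvSpl_mem_no_nl (x : List Char) (cur p : List Char) (hc : '\n' ∉ cur)
    (hp : p ∈ pvSplCur cur x) : '\n' ∉ p := by
  match x with
  | [] =>
      simp [pvSplCur] at hp
      subst hp; simpa using hc
  | c :: t =>
      by_cases h : c = '\n'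
      · subst h
        rw [pvSplCur, if_pos rfl] at hp
        rcases List.mem_cons.mp hp with rfl | hp'
        · simpa using hc
        · exact pvSpl_mem_no_nl t [] p (by simp) hp'
      · rw [pvSplCur, if_neg h] at hp
        exact pvSpl_mem_no_nl t (c :: cur) p (by simp [hc, Ne.symm h]) hp

theorem pvMem_strip (s : List Char) (c : Char) (h : c ∈ PySem.Chars.strip s) : c ∈ s := by
  have h1 : c ∈ (List.dropWhile PySem.Chars.isspace
      (List.dropWhile PySem.Chars.isspace s).reverse).reverse := h
  rw [List.mem_reverse] at h1
  have h2 := (List.dropWhile_sublist (p := PySem.Chars.isspace)).mem h1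
  rw [List.mem_reverse] at h2
  exact (List.dropWhile_sublist (p := PySem.Chars.isspace)).mem h2

theorem pvEndswith_last (l : List Char) (c : Char) :
    PySem.Chars.endswith l [c] = true ↔ l.getLast? = some c := by
  rw [PySem.Chars.endswith_iff]
  constructor
  · rintro ⟨t, rfl⟩; simp
  · intro h
    rcases List.eq_nil_or_concat l with rfl | ⟨t, x, rfl⟩
    · simp at h
    · simp at h; exact ⟨t, by simp [h]⟩

-- stage 1: A's loop equals the skip-free loop on the stripped, kept lines
theorem pvStage1 (lines : List (List Char)) :
    ∀ (commands : List (List Char)) (current : List Char),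
      pvALoop lines commands current =
        pvAK2 ((lines.map PySem.Chars.strip).filter pvKeep) commands current := by
  induction lines with
  | nil => intro commands current; simp [pvALoop, pvAK2]
  | cons l rest ih =>
      intro commands current
      simp only [List.map_cons, List.filter_cons]
      by_cases hskip : ((PySem.Chars.strip l).isEmpty
          || PySem.Chars.startswith (PySem.Chars.strip l) ['#']) = true
      · have hf : pvKeep (PySem.Chars.strip l) = false := by
          unfold pvKeep
          rcases Bool.or_eq_true_iff.mp hskip with h | h <;> simp [h]
        rw [hf]
        simp only [Bool.false_eq_true, if_false]
        rw [show pvALoop (l :: rest) commands current = pvALoop rest commands current by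
          simp [pvALoop, hskip]]
        exact ih commands current
      · have ht : pvKeep (PySem.Chars.strip l) = true := by
          unfold pvKeep
          simp only [Bool.or_eq_true, not_or] at hskip
          simp [hskip.1, hskip.2]
        rw [ht]
        simp only [if_true]
        by_cases hc : PySem.Chars.endswith (PySem.Chars.strip l) ['\\'] = true
        · rw [show pvALoop (l :: rest) commands current
              = pvALoop rest commands
                  (current ++ PySem.List.slice (PySem.Chars.strip l) none (some (-1)) ++ [' ']) by
            simp [pvALoop, hskip, hc]]
          rw [show pvAK2 (PySem.Chars.strip l :: List.filter pvKeep (List.map PySem.Chars.strip rest)) commands current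
              = pvAK2 (List.filter pvKeep (List.map PySem.Chars.strip rest)) commands
                  (current ++ PySem.List.slice (PySem.Chars.strip l) none (some (-1)) ++ [' ']) by
            simp [pvAK2, hc]]
          exact ih _ _
        · rw [show pvALoop (l :: rest) commands current
              = (if PySem.Chars.strip (current ++ PySem.Chars.strip l) ≠ [] then
                  pvALoop rest (commands ++ [PySem.Chars.strip (current ++ PySem.Chars.strip l)]) []
                else pvALoop rest commands []) by
            simp [pvALoop, hskip, hc]]
          rw [show pvAK2 (PySem.Chars.strip l :: List.filter pvKeep (List.map PySem.Chars.strip rest)) commands current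
              = (if PySem.Chars.strip (current ++ PySem.Chars.strip l) ≠ [] then
                  pvAK2 (List.filter pvKeep (List.map PySem.Chars.strip rest)) (commands ++ [PySem.Chars.strip (current ++ PySem.Chars.strip l)]) []
                else pvAK2 (List.filter pvKeep (List.map PySem.Chars.strip rest)) commands []) by
            simp only [pvAK2, hc, Bool.false_eq_true, if_false]]
          split_ifs with hne
          · exact ih _ _
          · exact ih _ _

-- stage 2: the skip-free loop computes Source B's replace/split pipeline
theorem pvCore (kept : List (List Char)) :
    ∀ (current : List Char) (commands : List (List Char)),
      (∀ l ∈ kept, l ≠ [] ∧ '\n' ∉ l) → '\n' ∉ current → current.getLast? ≠ some '\\' →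
      pvAK2 kept commands current = commands ++ pvPost (pvRep (current ++ pvFlatN kept)) := by
  induction kept with
  | nil =>
      intro cur cmds _ hnl _
      rw [show pvFlatN [] = [] from rfl, List.append_nil, pvRep_no_nl cur hnl]
      unfold pvPost
      rw [pvSplitOn_eq, pvSpl_no_nl cur [] hnl]
      by_cases he : PySem.Chars.strip cur = []
      · simp [pvAK2, he]
      · simp [pvAK2, he]
  | cons l r ih =>
      intro cur cmds hk hnl hlast
      have hl0 : l ≠ [] := (hk l (List.mem_cons_self)).1
      have hlnl : '\n' ∉ l := (hk l (List.mem_cons_self)).2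
      have hkr : ∀ l' ∈ r, l' ≠ [] ∧ '\n' ∉ l' := fun l' hm => hk l' (List.mem_cons_of_mem _ hm)
      have hclnl : '\n' ∉ cur ++ l := by
        intro hm; rcases List.mem_append.mp hm with hm | hm
        · exact hnl hm
        · exact hlnl hm
      have hflat : cur ++ pvFlatN (l :: r) = (cur ++ l) ++ '\n' :: pvFlatN r := by
        simp [pvFlatN]
      by_cases hc : PySem.Chars.endswith l ['\\'] = true
      · have hgl : l.getLast? = some '\\' := (pvEndswith_last l '\\').mp hc
        have hgcl : (cur ++ l).getLast? = some '\\' := by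
          rw [List.getLast?_append_of_ne_nil cur hl0]; exact hgl
        have hrep : pvRep (cur ++ pvFlatN (l :: r))
            = (cur ++ l.dropLast ++ [' ']) ++ pvRep (pvFlatN r) := by
          rw [hflat, pvRep_step _ _ hclnl, if_pos hgcl, List.dropLast_append_of_ne_nil hl0]
          simp
        have hcur' : '\n' ∉ cur ++ l.dropLast ++ [' '] := by
          intro hm
          rcases List.mem_append.mp hm with hm | hm
          · rcases List.mem_append.mp hm with hm | hm
            · exact hnl hm
            · exact hlnl ((List.dropLast_sublist l).mem hm)
          · simp at hm
        have hlast' : (cur ++ l.dropLast ++ [' ']).getLast? ≠ some '\\' := by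
          rw [List.getLast?_append_of_ne_nil _ (by simp : ([' '] : List Char) ≠ [])]
          simp
        have hrep' : pvRep ((cur ++ l.dropLast ++ [' ']) ++ pvFlatN r)
            = (cur ++ l.dropLast ++ [' ']) ++ pvRep (pvFlatN r) :=
          pvRep_prefix _ _ hcur' hlast'
        rw [show pvAK2 (l :: r) cmds cur
            = pvAK2 r cmds (cur ++ PySem.List.slice l none (some (-1)) ++ [' ']) by
          simp [pvAK2, hc]]
        rw [PySem.List.slice_to_neg_one]
        rw [ih _ cmds hkr hcur' hlast', hrep', ← hrep]
      · have hgl : (cur ++ l).getLast? ≠ some '\\' := by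
          rw [List.getLast?_append_of_ne_nil cur hl0]
          intro hgl; exact hc ((pvEndswith_last l '\\').mpr hgl)
        have hrep : pvRep (cur ++ pvFlatN (l :: r))
            = (cur ++ l) ++ '\n' :: pvRep (pvFlatN r) := by
          rw [hflat, pvRep_step _ _ hclnl, if_neg hgl]
        have hpost : pvPost (pvRep (cur ++ pvFlatN (l :: r)))
            = (if !(PySem.Chars.strip (cur ++ l)).isEmpty
                then [PySem.Chars.strip (cur ++ l)] else [])
              ++ pvPost (pvRep (pvFlatN r)) := by
          rw [hrep]
          unfold pvPost
          rw [pvSplitOn_eq, pvSpl_cons _ _ [] hclnl, ← pvSplitOn_eq]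
          rw [List.map_cons, List.filter_cons]
          by_cases he : (PySem.Chars.strip (cur ++ l)).isEmpty
          · simp [he]
          · simp [he]
        rw [hpost]
        by_cases hne : PySem.Chars.strip (cur ++ l) = []
        · rw [show pvAK2 (l :: r) cmds cur = pvAK2 r cmds [] by
            simp [pvAK2, hc, hne]]
          rw [ih [] cmds hkr (by simp) (by simp)]
          simp [hne]
        · rw [show pvAK2 (l :: r) cmds cur
              = pvAK2 r (cmds ++ [PySem.Chars.strip (cur ++ l)]) [] by
            simp [pvAK2, hc, hne]]
          rw [ih [] (cmds ++ [PySem.Chars.strip (cur ++ l)]) hkr (by simp) (by simp)]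
          rw [if_pos (by simpa using hne)]
          simp

theorem pvJoin_flatten (parts : List (List Char)) :
    PySem.Chars.join [] parts = parts.flatten := by
  induction parts with
  | nil => simp [PySem.Chars.join, List.intercalate]
  | cons p ps ih =>
      cases ps <;> simp_all [PySem.Chars.join, List.intercalate, List.intersperse]

-- ===== VERDICT (by name: the statement is the Claim_ definition above) =====
theorem multiline_to_commands_spec : Claim_equal_multiline_to_commands := by
  intro text _
  unfold Spec_multiline_to_commands multiline_to_commands multiline_to_commands_alt
  rw [pvStage1]
  have hkept : ∀ l ∈ ((PySem.Chars.splitOn (PySem.Chars.strip text.toList) ['\n']).map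
      PySem.Chars.strip).filter pvKeep, l ≠ [] ∧ '\n' ∉ l := by
    intro l hm
    rcases List.mem_filter.mp hm with ⟨hmem, hkeep⟩
    rcases List.mem_map.mp hmem with ⟨raw, hraw, rfl⟩
    refine ⟨?_, ?_⟩
    · intro h; rw [h] at hkeep; simp [pvKeep] at hkeep
    · have hrawnl : '\n' ∉ raw := by
        rw [pvSplitOn_eq] at hraw
        exact pvSpl_mem_no_nl _ [] raw (by simp) hraw
      exact fun hm' => hrawnl (pvMem_strip raw '\n' hm')
  rw [pvCore _ [] [] hkept (by simp) (by simp)]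
  simp [pvPost, pvFlatN, pvJoin_flatten, pvReplace_eq]
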